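-- pv_equiv track=rewrite | github.com/ark-poiop/dkwjawj_renew | market_data_strategy.py | _is_valid_realtime_data
-- ===== SOURCE A (Python) =====
-- from typing import Dict, Optional, Any
--
-- def _is_valid_realtime_data(data: Dict[str, Any]) -> bool:
--     """실시간 데이터 유효성 검사"""
--     if not data:
--         return False
--
--     indices = data.get('indices', {})
--     if not indices:
--         return False
--
--     # 해외 지수는 24시간 제공되므로 이를 우선 확인
--     overseas_indices = ['S&P500', 'NASDAQ', 'DOW']
--     overseas_valid = any(
--         indices.get(index, 0) > 0
--         for index in overseas_indices
--         if index in indices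
--     )
--
--     # 국내 지수 확인
--     domestic_indices = ['KOSPI', 'KOSDAQ']
--     domestic_valid = any(
--         indices.get(index, 0) > 0
--         for index in domestic_indices
--         if index in indices
--     )
--
--     # 해외 지수가 유효하거나, 국내 지수가 유효하면 OK
--     # (장 시간이 아니면 국내 지수가 0일 수 있음)
--     return overseas_valid or domestic_valid
-- ===== SOURCE B (Python) =====
-- def _is_valid_realtime_data(data):
--     """실시간 데이터 유효성 검사"""
--     if not data:
--         return False
--
--     indices = data.get('indices', {})
--     if not indices:
--         return False
--
--     # One pass: track the largest value seen among the tracked index names;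
--     # the data is valid iff that maximum is positive.
--     best = 0
--     for name, value in indices.items():
--         if name in ('S&P500', 'NASDAQ', 'DOW', 'KOSPI', 'KOSDAQ') and value > best:
--             best = value
--     return best > 0
-- ===== Notes on version B (the rewrite author's own statement) =====
-- stated objective: alternative
-- what changed: B replaces A's two staged any()-passes over fixed name lists with repeated membership tests and .get lookups by a single fold over indices.items() maintaining a running maximum among tracked names, deciding validity by best > 0 at the end.
import Mathlib
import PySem

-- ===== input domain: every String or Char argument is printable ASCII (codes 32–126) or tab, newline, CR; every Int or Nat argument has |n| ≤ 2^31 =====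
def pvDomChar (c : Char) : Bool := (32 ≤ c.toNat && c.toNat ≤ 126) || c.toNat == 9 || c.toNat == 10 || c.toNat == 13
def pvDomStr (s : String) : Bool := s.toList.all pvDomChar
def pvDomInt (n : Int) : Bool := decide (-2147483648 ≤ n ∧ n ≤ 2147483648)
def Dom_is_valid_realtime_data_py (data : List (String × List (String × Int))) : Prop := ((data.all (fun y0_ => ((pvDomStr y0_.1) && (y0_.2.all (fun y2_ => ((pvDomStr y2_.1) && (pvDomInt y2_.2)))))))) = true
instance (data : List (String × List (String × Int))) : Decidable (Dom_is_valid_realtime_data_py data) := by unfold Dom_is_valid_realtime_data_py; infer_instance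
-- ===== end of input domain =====

-- One honest line: B replaces A's two staged any()-passes with per-name dict probes by a
-- single accumulator pass over indices.items() keeping the maximum tracked value, then
-- tests best > 0 (alternative decomposition, same cost on the fixed names).

-- ===== PORT A =====
def is_valid_realtime_data_py (data : List (String × List (String × Int))) : Bool :=
  if data.isEmpty then false
  else
    -- indices = data.get('indices', {})
    let indices := (PySem.Dict.mk data).getD "indices" []
    if indices.isEmpty then false
    else
      let overseas_indices : List String := ["S&P500", "NASDAQ", "DOW"]
      let overseas_valid := overseas_indices.any (fun index =>
        if (PySem.Dict.mk indices).contains index then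
          decide ((PySem.Dict.mk indices).getD index 0 > 0)
        else false)
      let domestic_indices : List String := ["KOSPI", "KOSDAQ"]
      let domestic_valid := domestic_indices.any (fun index =>
        if (PySem.Dict.mk indices).contains index then
          decide ((PySem.Dict.mk indices).getD index 0 > 0)
        else false)
      overseas_valid || domestic_valid

-- ===== PORT B =====
-- 'name in (tuple of 5 literals)' ported as the disjunction of equality tests
def pvTracked (name : String) : Bool :=
  name == "S&P500" || name == "NASDAQ" || name == "DOW" || name == "KOSPI" || name == "KOSDAQ"

def is_valid_realtime_data_py_alt (data : List (String × List (String × Int))) : Bool :=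
  if data.isEmpty then false
  else
    let indices := (PySem.Dict.mk data).getD "indices" []
    if indices.isEmpty then false
    else
      let best := indices.foldl
        (fun best kv => if pvTracked kv.1 && decide (kv.2 > best) then kv.2 else best) (0 : Int)
      decide (best > 0)

-- ===== PRECONDITION & SPEC =====
-- Pre_ requires every inner association list to have distinct keys — the invariant every
-- Python dict satisfies; duplicate-key lists correspond to no Python input, and on them
-- A's first-match .get and B's pass over all items could disagree.
def Pre_is_valid_realtime_data_py (data : List (String × List (String × Int))) : Prop :=
  ∀ p ∈ data, (p.2.map Prod.fst).Nodup
instance (data : List (String × List (String × Int))) : Decidable (Pre_is_valid_realtime_data_py data) := by unfold Pre_is_valid_realtime_data_py; infer_instance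
def pvWitness_is_valid_realtime_data_py : (List (String × List (String × Int))) :=
  [("indices", [("KOSPI", 100), ("NASDAQ", 0)])]

def Spec_is_valid_realtime_data_py (data : List (String × List (String × Int))) (out : Bool) : Prop := out = is_valid_realtime_data_py_alt data
instance (data : List (String × List (String × Int))) (out : Bool) : Decidable (Spec_is_valid_realtime_data_py data out) := by unfold Spec_is_valid_realtime_data_py; infer_instance

-- ===== CLAIM (what is proved, stated in full; the proofs are below) =====
def Claim_equal_is_valid_realtime_data_py : Prop := ∀ (data : List (String × List (String × Int))), Dom_is_valid_realtime_data_py data → Pre_is_valid_realtime_data_py data → Spec_is_valid_realtime_data_py data (is_valid_realtime_data_py data)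

-- ===== LEMMAS AND PROOFS =====

-- A's per-name test (membership + .get) equals a scan of the list, given distinct keys.
theorem pv_entry (l : List (String × Int)) (hnd : (l.map Prod.fst).Nodup) (n : String) :
    (if (PySem.Dict.mk l).contains n then decide ((PySem.Dict.mk l).getD n 0 > 0) else false)
      = l.any (fun p => p.1 == n && decide (p.2 > 0)) := by
  induction l with
  | nil => simp [PySem.Dict.contains]
  | cons hd tl ih =>
    simp only [List.map_cons, List.nodup_cons] at hnd
    by_cases hk : hd.1 = n
    · subst hk
      have htl : tl.any (fun p => p.1 == hd.1 && decide (p.2 > 0)) = false := by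
        simp only [List.any_eq_false]
        intro p hp
        have : p.1 ≠ hd.1 := fun h => hnd.1 (h ▸ List.mem_map_of_mem hp)
        simp [this]
      simp [PySem.Dict.contains, PySem.Dict.get?, PySem.Dict.getD, htl]
    · have : (hd.1 == n) = false := by simp [hk]
      simp only [List.any_cons, this, Bool.false_and, Bool.false_or]
      rw [← ih hnd.2]
      simp [PySem.Dict.contains, PySem.Dict.get?, PySem.Dict.getD, this]

theorem pv_any_swap {α β : Type} (ns : List β) (l : List α) (f : α → β → Bool) :
    ns.any (fun n => l.any (fun p => f p n)) = l.any (fun p => ns.any (f p)) := by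
  rw [Bool.eq_iff_iff]
  simp only [List.any_eq_true]
  tauto

-- the looked-up 'indices' list inherits distinct keys from Pre_
theorem pv_nodup_lookup (data : List (String × List (String × Int)))
    (hpre : Pre_is_valid_realtime_data_py data) :
    ((((PySem.Dict.mk data).getD "indices" []) : List (String × Int)).map Prod.fst).Nodup := by
  cases hg : (PySem.Dict.mk data).get? "indices" with
  | none => simp [PySem.Dict.getD_eq_get?_getD, hg]
  | some v =>
    have hmem : ("indices", v) ∈ (PySem.Dict.mk data).items :=
      PySem.Dict.mem_items_of_get?_eq_some _ hg
    have : ("indices", v) ∈ data := hmem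
    rw [PySem.Dict.getD_eq_get?_getD, hg]
    exact hpre _ this

-- B's max-accumulator fold ends positive iff some tracked entry is positive.
theorem pv_anyfact (ns : List String) (c : Bool) (q : String) :
    (ns.any (fun n => (q == n) && c)) = ((ns.any (fun n => q == n)) && c) := by
  cases c <;> simp

theorem pv_fold (l : List (String × Int)) : ∀ b : Int, 0 ≤ b →
    decide (l.foldl (fun best kv => if pvTracked kv.1 && decide (kv.2 > best) then kv.2 else best) b > 0)
      = (decide (b > 0) || l.any (fun p => pvTracked p.1 && decide (p.2 > 0))) := by
  induction l with
  | nil => simp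
  | cons hd tl ih =>
    intro b hb
    simp only [List.foldl_cons, List.any_cons]
    by_cases ht : pvTracked hd.1
    · by_cases hgt : hd.2 > b
      · have h1 : (pvTracked hd.1 && decide (hd.2 > b)) = true := by simp [ht, hgt]
        simp only [h1, if_true]
        rw [ih hd.2 (by omega)]
        have hpos : decide (hd.2 > 0) = true := decide_eq_true (by omega)
        simp [ht, hpos]
      · have h1 : (pvTracked hd.1 && decide (hd.2 > b)) = false := by simp [hgt]
        simp only [h1, Bool.false_eq_true, if_false]
        rw [ih b hb]
        by_cases hp : hd.2 > 0
        · have hbpos : b > 0 := by omega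
          simp [ht, hp, hbpos]
        · simp [hp]
    · have h1 : (pvTracked hd.1 && decide (hd.2 > b)) = false := by simp [ht]
      simp only [h1, Bool.false_eq_true, if_false]
      rw [ih b hb]; simp [ht]

-- ===== VERDICT (by name: the statement is the Claim_ definition above) =====
theorem is_valid_realtime_data_py_spec : Claim_equal_is_valid_realtime_data_py := by
  intro data _ hpre
  unfold Spec_is_valid_realtime_data_py
  unfold is_valid_realtime_data_py is_valid_realtime_data_py_alt
  by_cases hd : data.isEmpty
  · simp [hd]
  · simp only [hd]
    have hnd := pv_nodup_lookup data hpre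
    set indices := ((PySem.Dict.mk data).getD "indices" []) with hi
    by_cases hie : indices.isEmpty
    · simp [hie]
    · simp only [hie]
      rw [pv_fold indices 0 le_rfl]
      simp only [gt_iff_lt, lt_self_iff_false, decide_false, Bool.false_or]
      simp only [pv_entry indices hnd]
      rw [← List.any_append, pv_any_swap]
      apply PySem.List.any_congr_mem
      intro p _
      rw [pv_anyfact]
      simp [pvTracked, List.any_cons, List.any_nil, Bool.or_false, Bool.or_assoc]
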